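-- pv_equiv track=rewrite | github.com/panmengguan/CS61A | Projects/project1/hog.py | final_strategy
-- ===== SOURCE A (Python) =====
-- def make_comeback_strategy(margin, num_rolls=5):
--     """Return a strategy that rolls one extra time when losing by MARGIN."""
--     "*** YOUR CODE HERE ***"
--     def function(score, opponent_score):
--         n = num_rolls
--         if ( opponent_score - score ) >= margin:
--             n = num_rolls + 1
--         return n
--     return function
--
-- def make_mean_strategy(min_points, num_rolls=5):
--     """Return a strategy that attempts to give the opponent problems."""
--     "*** YOUR CODE HERE ***"
--     def function(score, opponent_score):
--         free_bacon = opponent_score // 10 + 1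
--         if (min_points <= free_bacon) and (((score + free_bacon + opponent_score)%10 == 7) or ((score + free_bacon + opponent_score)%7 == 0)):
--             return 0
--         else:
--             return num_rolls
--     return function
--
-- def final_strategy(score, opponent_score):
--     """Final strategy that implements a few rules that will ensure 60+% winrate against the basic strategy
--
--     *** YOUR DESCRIPTION HERE ***
--     Implements make mean strategy and two forms of comeback strategy. Also implements checks to see if we can win in one turn by using
--     free bacon rule. Also strategy takes less risks when in the lead.
--
--     """
--     "*** YOUR CODE HERE ***"
--
--     n = 5
--     score_loop, opponent_score_loop = 90, 90
--
--     while score_loop != 100: #this will check for one turn win by taking advantage of the free bacon rule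
--
--         if opponent_score >= opponent_score_loop and score >= score_loop:
--             return 0
--         score_loop += 1
--         opponent_score_loop -= 10
--
--
--     if (score - opponent_score) >= 12: #win margin
--         n = 4
--     if (score - opponent_score) >= 30: #win margin
--         n = 3
--     if (opponent_score - score) >= 24: #lose margin
--         n = 7
--     if (opponent_score - score) >= 40: #lose margin
--         n = 8
--     n = make_comeback_strategy(7, n)(score, opponent_score) #lose margin
--     n = make_mean_strategy(5,n)(score, opponent_score) #implement take advantage of rules
--     return n
-- ===== SOURCE B (Python) =====
-- def final_strategy(score, opponent_score):
--     # closed-form one-turn-win test: exists i in 0..9 with score>=90+i and opponent_score>=90-10*i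
--     lo = max(0, -((opponent_score - 90) // 10))
--     hi = min(score - 90, 9)
--     if lo <= hi:
--         return 0
--     free_bacon = opponent_score // 10 + 1
--     total = score + free_bacon + opponent_score
--     if free_bacon >= 5 and (total % 10 == 7 or total % 7 == 0):
--         return 0
--     d = score - opponent_score
--     if d >= 30:
--         n = 3
--     elif d >= 12:
--         n = 4
--     elif d <= -40:
--         n = 8
--     elif d <= -24:
--         n = 7
--     else:
--         n = 5
--     return n + 1 if d <= -7 else n
-- ===== Notes on version B (the rewrite author's own statement) =====
-- stated objective: simpler
-- what changed: Replaces the 10-iteration while loop over (score_loop, opponent_score_loop) with a closed-form interval test lo<=hi for the one-turn-win check, and replaces the sequential overwrite cascade plus two strategy-factory closures with a single elif chain and inlined comeback/mean rules.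
import Mathlib
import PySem

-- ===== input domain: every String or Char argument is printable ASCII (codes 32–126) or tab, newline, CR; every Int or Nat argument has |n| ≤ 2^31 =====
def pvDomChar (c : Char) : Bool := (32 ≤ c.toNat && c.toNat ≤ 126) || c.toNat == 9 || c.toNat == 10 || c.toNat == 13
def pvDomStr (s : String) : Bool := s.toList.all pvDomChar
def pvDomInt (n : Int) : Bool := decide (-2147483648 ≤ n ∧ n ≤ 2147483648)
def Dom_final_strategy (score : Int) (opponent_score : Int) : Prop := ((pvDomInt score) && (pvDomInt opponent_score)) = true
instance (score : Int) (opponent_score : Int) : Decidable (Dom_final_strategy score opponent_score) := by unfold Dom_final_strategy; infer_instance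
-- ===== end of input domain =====

-- B replaces A's 10-step while loop with a closed-form interval test and the
-- overwrite cascade / strategy closures with a single elif chain (objective: simpler).

-- ===== PORT A =====
-- the while loop: score_loop runs 90..99 (stops at 100), opponent_score_loop 90 down by 10;
-- fuel 10 is exactly the loop's iteration count
def pvWinLoop (score opponent_score sl ol : Int) : Nat → Bool
  | 0 => false
  | fuel + 1 =>
    if sl = 100 then false
    else if opponent_score ≥ ol ∧ score ≥ sl then true
    else pvWinLoop score opponent_score (sl + 1) (ol - 10) fuel

-- make_comeback_strategy(7, n)(score, opponent_score)
def pvComeback (margin num_rolls score opponent_score : Int) : Int :=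
  if opponent_score - score ≥ margin then num_rolls + 1 else num_rolls

-- make_mean_strategy(5, n)(score, opponent_score)
def pvMean (min_points num_rolls score opponent_score : Int) : Int :=
  let free_bacon := PySem.Int.floordiv opponent_score 10 + 1
  if min_points ≤ free_bacon ∧
      (PySem.Int.mod (score + free_bacon + opponent_score) 10 = 7 ∨
       PySem.Int.mod (score + free_bacon + opponent_score) 7 = 0) then 0
  else num_rolls

def final_strategy (score : Int) (opponent_score : Int) : Int :=
  if pvWinLoop score opponent_score 90 90 10 then 0
  else
    let n0 : Int := 5
    let n1 := if score - opponent_score ≥ 12 then 4 else n0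
    let n2 := if score - opponent_score ≥ 30 then 3 else n1
    let n3 := if opponent_score - score ≥ 24 then 7 else n2
    let n4 := if opponent_score - score ≥ 40 then 8 else n3
    let n5 := pvComeback 7 n4 score opponent_score
    pvMean 5 n5 score opponent_score

-- ===== PORT B =====
def final_strategy_alt (score : Int) (opponent_score : Int) : Int :=
  let lo := max 0 (-(PySem.Int.floordiv (opponent_score - 90) 10))
  let hi := min (score - 90) 9
  if lo ≤ hi then 0
  else
    let free_bacon := PySem.Int.floordiv opponent_score 10 + 1
    let total := score + free_bacon + opponent_score
    if 5 ≤ free_bacon ∧ (PySem.Int.mod total 10 = 7 ∨ PySem.Int.mod total 7 = 0) then 0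
    else
      let d := score - opponent_score
      let n : Int :=
        if d ≥ 30 then 3
        else if d ≥ 12 then 4
        else if d ≤ -40 then 8
        else if d ≤ -24 then 7
        else 5
      if d ≤ -7 then n + 1 else n

-- ===== PRECONDITION & SPEC =====
def Spec_final_strategy (score : Int) (opponent_score : Int) (out : Int) : Prop := out = final_strategy_alt score opponent_score
instance (score : Int) (opponent_score : Int) (out : Int) : Decidable (Spec_final_strategy score opponent_score out) := by unfold Spec_final_strategy; infer_instance

-- ===== CLAIM (what is proved, stated in full; the proofs are below) =====
def Claim_equal_final_strategy : Prop := ∀ (score : Int) (opponent_score : Int), Dom_final_strategy score opponent_score → Spec_final_strategy score opponent_score (final_strategy score opponent_score)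

-- ===== LEMMAS AND PROOFS =====

-- the unrolled loop decides exactly the closed-form interval test of B
theorem pvWinLoop_iff (score opponent_score : Int) :
    pvWinLoop score opponent_score 90 90 10 = true ↔
      max 0 (-(PySem.Int.floordiv (opponent_score - 90) 10)) ≤ min (score - 90) 9 := by
  have hdiv : PySem.Int.floordiv (opponent_score - 90) 10 = (opponent_score - 90) / 10 :=
    PySem.Int.floordiv_eq_ediv_of_pos (by norm_num)
  simp only [pvWinLoop, hdiv]
  norm_num
  omega

theorem final_strategy_spec' (score opponent_score : Int) :
    final_strategy score opponent_score = final_strategy_alt score opponent_score := by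
  simp only [final_strategy, final_strategy_alt, pvComeback, pvMean]
  by_cases hw : max 0 (-(PySem.Int.floordiv (opponent_score - 90) 10)) ≤ min (score - 90) 9
  · rw [if_pos ((pvWinLoop_iff score opponent_score).mpr hw), if_pos hw]
  · rw [if_neg (hw ∘ (pvWinLoop_iff score opponent_score).mp), if_neg hw]
    split_ifs <;> omega

-- ===== VERDICT (by name: the statement is the Claim_ definition above) =====
theorem final_strategy_spec : Claim_equal_final_strategy := by
  intro score opponent_score _
  exact final_strategy_spec' score opponent_score
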